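-- pv_equiv track=rewrite | github.com/boliwar/wine | main.py | get_str_years
-- ===== SOURCE A (Python) =====
-- def get_str_years(years):
--     if len(str(years)) == 2 and (years // 10) == 1:
--         return 'лет'
--
--     if len(str(years)) > 1:
--         return get_str_years(years % (10 ** (len(str(years)) - 1)))
--
--     if years == 1:
--         return 'год'
--     elif years in (2, 3, 4):
--         return 'года'
--     else:
--         return 'лет'
-- ===== SOURCE B (Python) =====
-- def get_str_years(years):
--     if 11 <= years % 100 <= 14:
--         return 'лет'
--     d = years % 10
--     if d == 1:
--         return 'год'
--     if d in (2, 3, 4):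
--         return 'года'
--     return 'лет'
-- ===== Notes on version B (the rewrite author's own statement) =====
-- stated objective: idiomatic
-- what changed: Replaced the recursive digit-stripping via str(years) lengths and 10**k moduli with the standard closed-form Russian-plural rule on years % 100 and years % 10 (no recursion, no string conversion).
import Mathlib
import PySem

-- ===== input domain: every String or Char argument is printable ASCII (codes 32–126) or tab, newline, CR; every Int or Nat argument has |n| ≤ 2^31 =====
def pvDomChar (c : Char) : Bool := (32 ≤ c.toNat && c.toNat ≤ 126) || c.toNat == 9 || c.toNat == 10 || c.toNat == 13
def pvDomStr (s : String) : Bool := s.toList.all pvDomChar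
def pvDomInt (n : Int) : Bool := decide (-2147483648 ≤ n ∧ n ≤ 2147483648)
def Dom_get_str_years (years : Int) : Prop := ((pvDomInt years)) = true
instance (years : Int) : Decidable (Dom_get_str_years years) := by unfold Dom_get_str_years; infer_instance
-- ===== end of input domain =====

-- B replaces A's recursive digit-stripping (via len(str(years)) and 10**k moduli) with the
-- standard closed-form Russian-plural rule on years % 100 / years % 10 (objective: idiomatic).

-- ===== PORT A =====
-- The fuel argument only guards totality: each recursive call strictly shortens str(years),
-- so fuel = len(str(years)) always suffices (proved below in aux_eq_alt).
def getStrYearsAux : Nat → Int → String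
  | 0, _ => ""
  | fuel+1, years =>
    if (PySem.Int.toChars years).length = 2 ∧ PySem.Int.floordiv years 10 = 1 then "лет"
    else if 1 < (PySem.Int.toChars years).length then
      getStrYearsAux fuel (PySem.Int.mod years (10 ^ ((PySem.Int.toChars years).length - 1)))
    else if years = 1 then "год"
    else if years = 2 ∨ years = 3 ∨ years = 4 then "года"
    else "лет"

def get_str_years (years : Int) : String :=
  getStrYearsAux (PySem.Int.toChars years).length years

-- ===== PORT B =====
def get_str_years_alt (years : Int) : String :=
  if 11 ≤ PySem.Int.mod years 100 ∧ PySem.Int.mod years 100 ≤ 14 then "лет"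
  else if PySem.Int.mod years 10 = 1 then "год"
  else if PySem.Int.mod years 10 = 2 ∨ PySem.Int.mod years 10 = 3 ∨ PySem.Int.mod years 10 = 4 then "года"
  else "лет"

-- ===== PRECONDITION & SPEC =====
def Spec_get_str_years (years : Int) (out : String) : Prop := out = get_str_years_alt years
instance (years : Int) (out : String) : Decidable (Spec_get_str_years years out) := by unfold Spec_get_str_years; infer_instance

-- ===== CLAIM (what is proved, stated in full; the proofs are below) =====
def Claim_equal_get_str_years : Prop := ∀ (years : Int), Dom_get_str_years years → Spec_get_str_years years (get_str_years years)

-- ===== LEMMAS AND PROOFS =====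

lemma toDigitsCore10_len (fuel : Nat) : ∀ (n : Nat) (ds : List Char), n < fuel →
    (Nat.toDigitsCore 10 fuel n ds).length = ds.length + Nat.log 10 n + 1 := by
  induction fuel with
  | zero => intro n ds h; omega
  | succ fuel ih =>
    intro n ds h
    rw [Nat.toDigitsCore]
    by_cases h0 : n / 10 = 0
    · have hn : n < 10 := by omega
      rw [if_pos h0]
      have : Nat.log 10 n = 0 := Nat.log_eq_zero_iff.mpr (Or.inl hn)
      simp [this]
    · rw [if_neg h0]
      have hn : 10 ≤ n := by
        by_contra hc
        exact h0 (Nat.div_eq_of_lt (by omega))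
      have hrec : n / 10 < fuel := by
        have := Nat.div_lt_self (by omega : 0 < n) (by omega : 1 < 10)
        omega
      rw [ih (n / 10) _ hrec]
      have hlog : Nat.log 10 (n / 10) = Nat.log 10 n - 1 := Nat.log_div_base 10 n
      have hpos : 0 < Nat.log 10 n := Nat.log_pos (by omega) hn
      simp only [List.length_cons]
      omega

lemma toDigits10_len (n : Nat) : (Nat.toDigits 10 n).length = Nat.log 10 n + 1 := by
  rw [Nat.toDigits]
  simpa using toDigitsCore10_len (n+1) n [] (Nat.lt_succ_self n)

lemma toChars_of_nonneg (y : Int) (h : 0 ≤ y) :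
    PySem.Int.toChars y = Nat.toDigits 10 y.toNat := by
  simp [PySem.Int.toChars, not_lt.mpr h]

lemma toChars_len_nonneg (y : Int) (h : 0 ≤ y) :
    (PySem.Int.toChars y).length = Nat.log 10 y.toNat + 1 := by
  rw [toChars_of_nonneg y h, toDigits10_len]

lemma toChars_len_neg (y : Int) (h : y < 0) :
    (PySem.Int.toChars y).length = Nat.log 10 y.natAbs + 2 := by
  simp [PySem.Int.toChars, h, toDigits10_len]

lemma toChars_len_pos (y : Int) : 0 < (PySem.Int.toChars y).length := by
  by_cases h : y < 0
  · rw [toChars_len_neg y h]; omega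
  · rw [toChars_len_nonneg y (by omega)]; omega

lemma len_le_one (y : Int) (h : (PySem.Int.toChars y).length ≤ 1) : 0 ≤ y ∧ y ≤ 9 := by
  by_cases hneg : y < 0
  · rw [toChars_len_neg y hneg] at h; omega
  · push Not at hneg
    rw [toChars_len_nonneg y hneg] at h
    have hlog : Nat.log 10 y.toNat = 0 := by omega
    have : y.toNat < 10 := by
      by_contra hc
      have := Nat.log_pos (by omega : 1 < 10) (by omega : 10 ≤ y.toNat)
      omega
    omega

lemma len_eq_two (y : Int) (h : (PySem.Int.toChars y).length = 2) :
    (10 ≤ y ∧ y ≤ 99) ∨ (-9 ≤ y ∧ y ≤ -1) := by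
  by_cases hneg : y < 0
  · rw [toChars_len_neg y hneg] at h
    have hlog : Nat.log 10 y.natAbs = 0 := by omega
    have : y.natAbs < 10 := by
      by_contra hc
      have := Nat.log_pos (by omega : 1 < 10) (by omega : 10 ≤ y.natAbs)
      omega
    omega
  · push Not at hneg
    rw [toChars_len_nonneg y hneg] at h
    have hlog : Nat.log 10 y.toNat = 1 := by omega
    have hne : y.toNat ≠ 0 := by
      intro hc; rw [hc, Nat.log_zero_right] at hlog; omega
    have hlo : 10 ^ 1 ≤ y.toNat := by
      calc 10 ^ 1 = 10 ^ Nat.log 10 y.toNat := by rw [hlog]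
      _ ≤ y.toNat := Nat.pow_log_le_self 10 hne
    have hhi : y.toNat < 10 ^ 2 := by
      have := Nat.lt_pow_succ_log_self (by omega : 1 < 10) y.toNat
      rw [hlog] at this
      exact this
    left
    omega

lemma alt_let_10_19 (y : Int) (h1 : 10 ≤ y) (h2 : y ≤ 19) : get_str_years_alt y = "лет" := by
  interval_cases y <;> decide

lemma alt_congr (y n : Int) (hn : 0 < n) (h100 : (100:Int) ∣ n) :
    get_str_years_alt (PySem.Int.mod y n) = get_str_years_alt y := by
  have h10 : (10:Int) ∣ n := dvd_trans (by norm_num) h100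
  unfold get_str_years_alt
  simp only [PySem.Int.mod_eq_emod_of_pos hn,
    PySem.Int.mod_eq_emod_of_pos (show (0:Int) < 100 by norm_num),
    PySem.Int.mod_eq_emod_of_pos (show (0:Int) < 10 by norm_num)]
  rw [Int.emod_emod_of_dvd y h100, Int.emod_emod_of_dvd y h10]

lemma alt_mod10 (y : Int) (h : ¬(11 ≤ y % 100 ∧ y % 100 ≤ 14)) :
    get_str_years_alt (PySem.Int.mod y 10) = get_str_years_alt y := by
  unfold get_str_years_alt
  simp only [PySem.Int.mod_eq_emod_of_pos (show (0:Int) < 100 by norm_num),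
    PySem.Int.mod_eq_emod_of_pos (show (0:Int) < 10 by norm_num)]
  have h0 : 0 ≤ y % 10 := Int.emod_nonneg y (by norm_num)
  have h1 : y % 10 < 10 := Int.emod_lt_of_pos y (by norm_num)
  rw [Int.emod_eq_of_lt h0 (by omega), Int.emod_emod_of_dvd y dvd_rfl,
    if_neg (by omega), if_neg h]

lemma aux_eq_alt : ∀ (fuel : Nat) (y : Int), (PySem.Int.toChars y).length ≤ fuel →
    getStrYearsAux fuel y = get_str_years_alt y := by
  intro fuel
  induction fuel with
  | zero =>
    intro y h
    exact absurd h (by have := toChars_len_pos y; omega)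
  | succ fuel ih =>
    intro y h
    rw [getStrYearsAux]
    split_ifs with h1 h2 h3 h4
    -- branch 1: len == 2 and years // 10 == 1
    · obtain ⟨hrange1, hrange2⟩ :=
        ((PySem.Int.floordiv_eq_iff_of_pos (show (0:Int) < 10 by norm_num)).mp h1.2)
      exact (alt_let_10_19 y (by omega) (by omega)).symm
    -- branch 2: len > 1, recurse on years % 10^(len-1)
    · set L := (PySem.Int.toChars y).length with hL
      have hkpos : 0 < L - 1 := by omega
      have hpow : (0:Int) < 10 ^ (L - 1) := pow_pos (by norm_num) _
      set y' := PySem.Int.mod y (10 ^ (L - 1)) with hy'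
      have hy'0 : 0 ≤ y' := PySem.Int.mod_nonneg y hpow
      have hy'lt : y' < 10 ^ (L - 1) := PySem.Int.mod_lt y hpow
      have hy'nat : y'.toNat < 10 ^ (L - 1) := by
        have : ((10:Int)) ^ (L-1) = ((10 ^ (L-1) : Nat) : Int) := by push_cast; ring
        omega
      have hlen' : (PySem.Int.toChars y').length ≤ fuel := by
        rw [toChars_of_nonneg y' hy'0]
        have := Nat.toDigits_length 10 y'.toNat (L - 1) hkpos hy'nat
        omega
      rw [ih y' hlen']
      by_cases hL2 : L = 2
      · -- len == 2 and years // 10 ≠ 1 : y ∈ 20..99 ∪ -9..-1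
        have hr := len_eq_two y (by omega)
        have hnot1 : ¬ PySem.Int.floordiv y 10 = 1 := fun hc => h1 ⟨hL2, hc⟩
        have hnot10_19 : ¬(10 ≤ y ∧ y ≤ 19) := by
          intro hc
          exact hnot1 ((PySem.Int.floordiv_eq_iff_of_pos
            (show (0:Int) < 10 by norm_num)).mpr ⟨by omega, by omega⟩)
        have hm : ¬(11 ≤ y % 100 ∧ y % 100 ≤ 14) := by
          rcases hr with ⟨ha, hb⟩ | ⟨ha, hb⟩
          · rw [Int.emod_eq_of_lt (by omega) (by omega)]; omega
          · omega
        have : (10:Int) ^ (L - 1) = 10 := by rw [hL2]; norm_num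
        rw [hy', this]
        exact alt_mod10 y hm
      · -- len ≥ 3 : 100 divides 10^(len-1), so B only sees y through y % 100 and y % 10
        have hdvd : (100:Int) ∣ 10 ^ (L - 1) := by
          have h3 : L - 1 = 2 + (L - 3) := by omega
          rw [h3, pow_add]
          exact dvd_mul_of_dvd_left (by norm_num : (100:Int) ∣ 10 ^ 2) _
        exact alt_congr y _ hpow hdvd
    -- branches 3–5: single "digit"
    all_goals {
      obtain ⟨hy0, hy9⟩ := len_le_one y (by omega)
      unfold get_str_years_alt
      interval_cases y <;> simp_all
    }

-- ===== VERDICT (by name: the statement is the Claim_ definition above) =====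
theorem get_str_years_spec : Claim_equal_get_str_years := by
  intro y _
  unfold Spec_get_str_years get_str_years
  exact aux_eq_alt _ y le_rfl
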